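-- pv_equiv track=rewrite | github.com/liampshaw/beta-lactamases | scripts/computeDistances.py | distFirstBreakpoint
-- ===== SOURCE A (Python) =====
-- def distFirstBreakpoint(a, b, starting_block, upstream=True):
--     """a, b are lists of blocks"""
--     a_start = a.index(starting_block)
--     b_start = b.index(starting_block)
--     shared_blocks = []
--     if upstream==False:
--         i = 0
--         while i<len(a)-a_start-1 and i<len(b)-b_start-1:
--             i += 1
--             if b_start<len(b):
--                 if a[i+a_start]==b[b_start+i]:
--                     shared_blocks.append(b[b_start+i])
--                 else:
--                     #if a[i+a_start] in shared_blocks: # append the block if it's a duplicated pre-existing one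
--                     #    shared_blocks.append(a[i+a_start]) # this means duplications 'don't count'
--                     break
--     elif upstream==True:
--         i = 0
--         while a_start-i > 0 and b_start-i > 0:
--             i = i+1
--             if a[a_start-i]==b[b_start-i]:
--                 shared_blocks.append(b[b_start-i])
--             else:
--                 #if a[a_start+i] in shared_blocks:
--                 #    shared_blocks.append(a[a_start+i])
--                 break
--     return(shared_blocks)
-- ===== SOURCE B (Python) =====
-- def _prefix_len(xs, ys):
--     """Length of the common prefix of xs and ys."""
--     n = 0
--     for x, y in zip(xs, ys):
--         if x != y:
--             break
--         n += 1
--     return n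
--
--
-- def distFirstBreakpoint(a, b, starting_block, upstream=True):
--     """a, b are lists of blocks"""
--     a_start = a.index(starting_block)
--     b_start = b.index(starting_block)
--     if upstream:
--         xs, ys = a[:a_start][::-1], b[:b_start][::-1]
--     else:
--         xs, ys = a[a_start + 1:], b[b_start + 1:]
--     return ys[:_prefix_len(xs, ys)]
-- ===== Notes on version B (the rewrite author's own statement) =====
-- stated objective: simpler
-- what changed: Replaces the two index-arithmetic while-loops (with manual i bookkeeping and break) by slicing the two flanks out once and returning a prefix of b's flank whose length is the common-prefix length of the two flanks.
import Mathlib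
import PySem

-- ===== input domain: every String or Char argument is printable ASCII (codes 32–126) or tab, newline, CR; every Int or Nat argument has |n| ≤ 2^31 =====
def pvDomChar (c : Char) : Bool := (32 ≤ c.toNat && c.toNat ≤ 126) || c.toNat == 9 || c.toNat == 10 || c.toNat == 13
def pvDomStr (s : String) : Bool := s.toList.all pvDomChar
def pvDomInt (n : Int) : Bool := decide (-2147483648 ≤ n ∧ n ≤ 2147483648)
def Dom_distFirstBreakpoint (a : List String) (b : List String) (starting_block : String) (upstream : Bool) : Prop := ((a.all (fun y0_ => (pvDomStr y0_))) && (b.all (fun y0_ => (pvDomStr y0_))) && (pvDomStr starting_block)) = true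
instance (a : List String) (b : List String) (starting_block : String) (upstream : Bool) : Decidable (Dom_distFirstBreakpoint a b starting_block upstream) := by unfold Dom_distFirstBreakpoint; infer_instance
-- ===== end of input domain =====

-- ===== PORT A =====
-- B replaces A's two index-arithmetic while-loops by slice + common-prefix length (objective: simpler).
-- Pre_ excludes inputs where starting_block is missing from a or b: there Python's list.index raises ValueError (in both A and B).

-- downstream while-loop of A: i, shared_blocks are the loop state.
-- In-range list reads use List.getD; the proofs show the indices are in range, matching Python's a[..].
def pvLoopDown (a b : List String) (a_start b_start i : Nat) (acc : List String) : List String :=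
  if h : i < a.length - a_start - 1 ∧ i < b.length - b_start - 1 then
    let i' := i + 1
    if b_start < b.length then
      if a.getD (i' + a_start) "" == b.getD (b_start + i') "" then
        pvLoopDown a b a_start b_start i' (acc ++ [b.getD (b_start + i') ""])
      else acc
    else acc
  else acc
termination_by a.length - a_start - 1 - i
decreasing_by omega

-- upstream while-loop of A
def pvLoopUp (a b : List String) (a_start b_start i : Nat) (acc : List String) : List String :=
  if h : a_start - i > 0 ∧ b_start - i > 0 then
    let i' := i + 1
    if a.getD (a_start - i') "" == b.getD (b_start - i') "" then
      pvLoopUp a b a_start b_start i' (acc ++ [b.getD (b_start - i') ""])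
    else acc
  else acc
termination_by a_start - i
decreasing_by omega

def distFirstBreakpoint (a : List String) (b : List String) (starting_block : String) (upstream : Bool) : List String :=
  match PySem.List.index? a starting_block, PySem.List.index? b starting_block with
  | some a_start, some b_start =>
    -- upstream : Bool, so 'if upstream==False … elif upstream==True …' is exhaustive
    if upstream == false then pvLoopDown a b a_start b_start 0 []
    else pvLoopUp a b a_start b_start 0 []
  | _, _ => []  -- Python raises ValueError here; excluded by Pre_

-- ===== PORT B =====
-- _prefix_len of Source B (the zip/break loop is the structural recursion on the two lists)
def pvPrefixLen : List String → List String → Nat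
  | x :: xs, y :: ys => if x == y then pvPrefixLen xs ys + 1 else 0
  | _, _ => 0

def distFirstBreakpoint_alt (a : List String) (b : List String) (starting_block : String) (upstream : Bool) : List String :=
  match PySem.List.index? a starting_block with
  | none => []  -- Python raises ValueError here; excluded by Pre_
  | some a_start =>
    match PySem.List.index? b starting_block with
    | none => []  -- Python raises ValueError here; excluded by Pre_
    | some b_start =>
      let xs := if upstream then (a.take a_start).reverse else a.drop (a_start + 1)
      let ys := if upstream then (b.take b_start).reverse else b.drop (b_start + 1)
      ys.take (pvPrefixLen xs ys)

-- ===== PRECONDITION & SPEC =====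
-- Pre_ excludes exactly the inputs on which A raises ValueError (starting_block missing from a or b).
def Pre_distFirstBreakpoint (a : List String) (b : List String) (starting_block : String) (upstream : Bool) : Prop :=
  starting_block ∈ a ∧ starting_block ∈ b
instance (a : List String) (b : List String) (starting_block : String) (upstream : Bool) : Decidable (Pre_distFirstBreakpoint a b starting_block upstream) := by unfold Pre_distFirstBreakpoint; infer_instance

def pvWitness_distFirstBreakpoint : List String × List String × String × Bool :=
  (["u", "s", "x", "y"], ["v", "s", "x", "z"], "s", false)

def Spec_distFirstBreakpoint (a : List String) (b : List String) (starting_block : String) (upstream : Bool) (out : List String) : Prop := out = distFirstBreakpoint_alt a b starting_block upstream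
instance (a : List String) (b : List String) (starting_block : String) (upstream : Bool) (out : List String) : Decidable (Spec_distFirstBreakpoint a b starting_block upstream out) := by unfold Spec_distFirstBreakpoint; infer_instance

-- ===== CLAIM (what is proved, stated in full; the proofs are below) =====
def Claim_equal_distFirstBreakpoint : Prop := ∀ (a : List String) (b : List String) (starting_block : String) (upstream : Bool), Dom_distFirstBreakpoint a b starting_block upstream → Pre_distFirstBreakpoint a b starting_block upstream → Spec_distFirstBreakpoint a b starting_block upstream (distFirstBreakpoint a b starting_block upstream)

-- ===== LEMMAS AND PROOFS =====

-- the value both loops compute, expressed structurally: b-elements of the common prefix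
def pvTw : List String → List String → List String
  | x :: xs, y :: ys => if x == y then y :: pvTw xs ys else []
  | _, _ => []

theorem pvTw_eq_take_prefixLen (xs ys : List String) : pvTw xs ys = ys.take (pvPrefixLen xs ys) := by
  induction xs generalizing ys with
  | nil => cases ys <;> simp [pvTw, pvPrefixLen]
  | cons x xs ih =>
    cases ys with
    | nil => simp [pvTw, pvPrefixLen]
    | cons y ys =>
      by_cases h : x == y <;> simp [pvTw, pvPrefixLen, h, ih]

theorem pvTw_nil_right (xs : List String) : pvTw xs [] = [] := by
  cases xs <;> rfl

theorem pvLoopDown_eq (a b : List String) (as bs : Nat) :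
    ∀ i acc, pvLoopDown a b as bs i acc = acc ++ pvTw (a.drop (as + 1 + i)) (b.drop (bs + 1 + i)) := by
  intro i acc
  induction i, acc using pvLoopDown.induct a b as bs with
  | case1 i acc h i' hb heq ih =>
    have ha1 : as + 1 + i < a.length := by omega
    have hb1 : bs + 1 + i < b.length := by omega
    have hxa : a.getD (i + 1 + as) "" = a[as + 1 + i] := by
      rw [List.getD_eq_getElem a "" (by omega : i + 1 + as < a.length)]
      congr 1; omega
    have hxb : b.getD (bs + (i + 1)) "" = b[bs + 1 + i] := by
      rw [List.getD_eq_getElem b "" (by omega : bs + (i + 1) < b.length)]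
      congr 1; omega
    have e1 : as + 1 + i + 1 = as + 1 + (i + 1) := by omega
    have e2 : bs + 1 + i + 1 = bs + 1 + (i + 1) := by omega
    rw [hxa, hxb] at heq
    simp only [i'] at ih
    rw [hxb, ← e1, ← e2] at ih
    rw [pvLoopDown, dif_pos h]
    simp only []
    rw [if_pos hb, hxa, hxb, if_pos heq, ih,
        List.drop_eq_getElem_cons ha1, List.drop_eq_getElem_cons hb1]
    have hc : pvTw (a[as + 1 + i] :: a.drop (as + 1 + i + 1)) (b[bs + 1 + i] :: b.drop (bs + 1 + i + 1))
        = b[bs + 1 + i] :: pvTw (a.drop (as + 1 + i + 1)) (b.drop (bs + 1 + i + 1)) := by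
      simp only [pvTw]
      rw [if_pos heq]
    rw [hc]
    simp [List.append_assoc]
  | case2 i acc h i' hb heq =>
    have ha1 : as + 1 + i < a.length := by omega
    have hb1 : bs + 1 + i < b.length := by omega
    have hxa : a.getD (i + 1 + as) "" = a[as + 1 + i] := by
      rw [List.getD_eq_getElem a "" (by omega : i + 1 + as < a.length)]
      congr 1; omega
    have hxb : b.getD (bs + (i + 1)) "" = b[bs + 1 + i] := by
      rw [List.getD_eq_getElem b "" (by omega : bs + (i + 1) < b.length)]
      congr 1; omega
    rw [hxa, hxb] at heq
    rw [pvLoopDown, dif_pos h]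
    simp only []
    rw [if_pos hb, hxa, hxb, if_neg heq,
        List.drop_eq_getElem_cons ha1, List.drop_eq_getElem_cons hb1]
    simp [pvTw, heq]
  | case3 i acc h hb =>
    -- inner guard b_start < len b is false: then bs + 1 + i ≥ len b, drop is empty
    rw [pvLoopDown]
    simp only [h, dif_pos, if_neg hb]
    have : b.drop (bs + 1 + i) = [] := List.drop_eq_nil_of_le (by omega)
    simp [this, pvTw_nil_right]
  | case4 i acc h =>
    rw [pvLoopDown]
    simp only [h, dif_neg, not_false_iff]
    rcases not_and_or.mp h with h' | h'
    · have : a.drop (as + 1 + i) = [] := List.drop_eq_nil_of_le (by omega)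
      simp [this, pvTw]
    · have : b.drop (bs + 1 + i) = [] := List.drop_eq_nil_of_le (by omega)
      simp [this, pvTw_nil_right]

theorem pvLoopUp_eq (a b : List String) (as bs : Nat) (has : as ≤ a.length) (hbs : bs ≤ b.length) :
    ∀ i acc, pvLoopUp a b as bs i acc = acc ++ pvTw ((a.take as).reverse.drop i) ((b.take bs).reverse.drop i) := by
  have hlena : (a.take as).reverse.length = as := by simp [List.length_take, Nat.min_eq_left has]
  have hlenb : (b.take bs).reverse.length = bs := by simp [List.length_take, Nat.min_eq_left hbs]
  have hget : ∀ (l : List String) (k j : Nat) (hk : k ≤ l.length) (hj : j < k),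
      (l.take k).reverse.getD j "" = l.getD (k - (j + 1)) "" := by
    intro l k j hk hj
    have h1 : j < (l.take k).reverse.length := by simp [List.length_take]; omega
    have h2 : k - (j + 1) < l.length := by omega
    rw [List.getD_eq_getElem _ "" h1, List.getD_eq_getElem _ "" h2]
    rw [List.getElem_reverse]
    rw [List.getElem_take]
    congr 1
    simp [List.length_take]
    omega
  intro i acc
  induction i, acc using pvLoopUp.induct a b as bs with
  | case1 i acc h i' heq ih =>
    have hia : i < as := by omega
    have hib : i < bs := by omega
    have h1 : i < (a.take as).reverse.length := by omega
    have h2 : i < (b.take bs).reverse.length := by omega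
    have hxa : a.getD (as - (i + 1)) "" = (a.take as).reverse[i] := by
      rw [← hget a as i has hia, List.getD_eq_getElem _ "" h1]
    have hxb : b.getD (bs - (i + 1)) "" = (b.take bs).reverse[i] := by
      rw [← hget b bs i hbs hib, List.getD_eq_getElem _ "" h2]
    rw [hxa, hxb] at heq
    simp only [i'] at ih
    rw [hxb] at ih
    rw [pvLoopUp, dif_pos h]
    simp only []
    rw [hxa, hxb, if_pos heq, ih,
        List.drop_eq_getElem_cons h1, List.drop_eq_getElem_cons h2]
    have : pvTw ((a.take as).reverse[i] :: (a.take as).reverse.drop (i + 1))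
        ((b.take bs).reverse[i] :: (b.take bs).reverse.drop (i + 1))
        = (b.take bs).reverse[i] :: pvTw ((a.take as).reverse.drop (i + 1)) ((b.take bs).reverse.drop (i + 1)) := by
      simp only [pvTw]
      rw [if_pos heq]
    rw [this]
    simp [List.append_assoc]
  | case2 i acc h i' heq =>
    have hia : i < as := by omega
    have hib : i < bs := by omega
    have h1 : i < (a.take as).reverse.length := by omega
    have h2 : i < (b.take bs).reverse.length := by omega
    have hxa : a.getD (as - (i + 1)) "" = (a.take as).reverse[i] := by
      rw [← hget a as i has hia, List.getD_eq_getElem _ "" h1]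
    have hxb : b.getD (bs - (i + 1)) "" = (b.take bs).reverse[i] := by
      rw [← hget b bs i hbs hib, List.getD_eq_getElem _ "" h2]
    rw [hxa, hxb] at heq
    rw [pvLoopUp, dif_pos h]
    simp only []
    rw [hxa, hxb, if_neg heq,
        List.drop_eq_getElem_cons h1, List.drop_eq_getElem_cons h2]
    simp only [pvTw]
    rw [if_neg heq]
    simp
  | case3 i acc h =>
    rw [pvLoopUp]
    simp only [h, dif_neg, not_false_iff]
    rcases not_and_or.mp h with h' | h'
    · have : (a.take as).reverse.drop i = [] := List.drop_eq_nil_of_le (by omega)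
      simp [this, pvTw]
    · have : (b.take bs).reverse.drop i = [] := List.drop_eq_nil_of_le (by omega)
      simp [this, pvTw_nil_right]

-- ===== VERDICT (by name: the statement is the Claim_ definition above) =====
theorem distFirstBreakpoint_spec : Claim_equal_distFirstBreakpoint := by
  intro a b s up _ hpre
  obtain ⟨ha, hb⟩ := hpre
  obtain ⟨as, has⟩ := Option.isSome_iff_exists.mp ((PySem.List.index?_isSome_iff a s).mpr ha)
  obtain ⟨bs, hbs⟩ := Option.isSome_iff_exists.mp ((PySem.List.index?_isSome_iff b s).mpr hb)
  obtain ⟨hasl, -, -⟩ := PySem.List.getElem_of_index?_eq_some has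
  obtain ⟨hbsl, -, -⟩ := PySem.List.getElem_of_index?_eq_some hbs
  unfold Spec_distFirstBreakpoint distFirstBreakpoint distFirstBreakpoint_alt
  rw [has, hbs]
  cases up with
  | false =>
    simp only [if_pos rfl, if_neg (by decide : ¬ (false = true))]
    rw [pvLoopDown_eq a b as bs 0 [], pvTw_eq_take_prefixLen]
    simp
  | true =>
    simp only [if_neg (by decide : ¬ (true == false) = true), if_pos rfl]
    rw [pvLoopUp_eq a b as bs (le_of_lt hasl) (le_of_lt hbsl) 0 [], pvTw_eq_take_prefixLen]
    simp
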